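-- pv_equiv track=rewrite | github.com/0xshre/rag-evaluation | src/utils.py | count_chars_in_topics
-- ===== SOURCE A (Python) =====
-- def count_chars_in_topics(original_text):
--     '''
--     Counts the number of characters in each topic.
--     '''
--     lines = original_text.split('\n')
--     current_topic = None
--     char_count = 0
--     topic_char_counts = {}
--
--     for line in lines:
--         level = line.count('=')
--         if level > 0:
--             if current_topic is not None:
--                 topic_char_counts[current_topic] = char_count
--             current_topic = line.strip(' =')
--             char_count = 0
--         else:
--             char_count += len(line)
--
--     # For the last topic
--     if current_topic is not None:
--         topic_char_counts[current_topic] = char_count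
--
--     return topic_char_counts
-- ===== SOURCE B (Python) =====
-- def count_chars_in_topics(original_text):
--     '''
--     Counts the number of characters in each topic.
--     '''
--     return dict(_sections(original_text.split('\n')))
--
--
-- def _sections(lines):
--     if not lines:
--         return []
--     line, rest = lines[0], lines[1:]
--     if line.count('='):
--         return [(line.strip(' ='), _body_len(rest))] + _sections(rest)
--     return _sections(rest)
--
--
-- def _body_len(lines):
--     total = 0
--     for line in lines:
--         if line.count('='):
--             break
--         total += len(line)
--     return total
-- ===== Notes on version B (the rewrite author's own statement) =====
-- stated objective: alternative
-- what changed: Replaces A's single-pass state machine (current_topic sentinel, running char_count, in-place dict mutation) by a structural recursion that partitions the lines into (topic, body-length) pairs via per-header lookahead and builds the dict once at the end.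
import Mathlib
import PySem

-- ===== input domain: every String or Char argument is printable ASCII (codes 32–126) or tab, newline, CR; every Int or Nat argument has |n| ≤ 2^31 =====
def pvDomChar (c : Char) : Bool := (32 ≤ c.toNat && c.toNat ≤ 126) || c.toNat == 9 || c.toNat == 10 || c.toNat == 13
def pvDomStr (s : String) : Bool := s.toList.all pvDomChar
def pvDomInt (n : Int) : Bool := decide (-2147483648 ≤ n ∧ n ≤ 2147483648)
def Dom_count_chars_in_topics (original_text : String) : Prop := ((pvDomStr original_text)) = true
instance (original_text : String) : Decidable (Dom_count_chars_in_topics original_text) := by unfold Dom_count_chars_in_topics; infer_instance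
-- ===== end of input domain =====

-- B replaces A's single-pass state machine (current_topic sentinel + running count +
-- in-place dict updates) by a structural recursion producing (topic, body-length) pairs
-- with per-header lookahead, building the dict once at the end (objective: alternative).

-- ===== PORT A =====
-- loop state: (current_topic, char_count, topic_char_counts)
def pvStateA : Type := Option String × Int × PySem.Dict String Int

def pvStepA (st : pvStateA) (line : String) : pvStateA :=
  if 0 < PySem.Str.count line "=" then
    match st.1 with
    | some t => (some (PySem.Str.stripChars line " ="), 0, st.2.2.insert t st.2.1)
    | none => (some (PySem.Str.stripChars line " ="), 0, st.2.2)
  else (st.1, st.2.1 + PySem.Str.len line, st.2.2)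

def count_chars_in_topics (original_text : String) : List (String × Int) :=
  let lines := (PySem.Str.split? original_text "\n").getD []
  let st := lines.foldl pvStepA (none, 0, PySem.Dict.empty)
  (match st.1 with
   | some t => st.2.2.insert t st.2.1
   | none => st.2.2).items

-- ===== PORT B =====
-- _body_len: total = 0; for line in lines: break at a header, else total += len(line)
def pvBodyLen (total : Int) : List String → Int
  | [] => total
  | l :: r => if 0 < PySem.Str.count l "=" then total else pvBodyLen (total + PySem.Str.len l) r

-- _sections: recursive partition of the lines into (topic, body-length) pairs
def pvSections : List String → List (String × Int)
  | [] => []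
  | l :: r =>
    if 0 < PySem.Str.count l "=" then
      (PySem.Str.stripChars l " =", pvBodyLen 0 r) :: pvSections r
    else pvSections r

def count_chars_in_topics_alt (original_text : String) : List (String × Int) :=
  (PySem.Dict.ofList (pvSections ((PySem.Str.split? original_text "\n").getD []))).items

-- ===== PRECONDITION & SPEC =====
def Spec_count_chars_in_topics (original_text : String) (out : List (String × Int)) : Prop := out = count_chars_in_topics_alt original_text
instance (original_text : String) (out : List (String × Int)) : Decidable (Spec_count_chars_in_topics original_text out) := by unfold Spec_count_chars_in_topics; infer_instance

-- ===== CLAIM (what is proved, stated in full; the proofs are below) =====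
def Claim_equal_count_chars_in_topics : Prop := ∀ (original_text : String), Dom_count_chars_in_topics original_text → Spec_count_chars_in_topics original_text (count_chars_in_topics original_text)

-- ===== LEMMAS AND PROOFS =====

-- A's loop with a pending topic (t, c) equals inserting all of ((t, pending-total) :: sections)
theorem pvLoop_some (lines : List String) :
    ∀ (t : String) (c : Int) (d : PySem.Dict String Int),
      (match (lines.foldl pvStepA (some t, c, d)).1 with
       | some u => (lines.foldl pvStepA (some t, c, d)).2.2.insert u (lines.foldl pvStepA (some t, c, d)).2.1
       | none => (lines.foldl pvStepA (some t, c, d)).2.2)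
      = d.update ((t, pvBodyLen c lines) :: pvSections lines) := by
  induction lines with
  | nil => intro t c d; simp [pvBodyLen, pvSections, PySem.Dict.update]
  | cons l r ih =>
    intro t c d
    by_cases h : 0 < PySem.Str.count l "="
    · simp only [List.foldl_cons, pvStepA, if_pos h]
      rw [ih]
      simp only [pvBodyLen, pvSections]
      rw [if_pos h, if_pos h]
      simp [PySem.Dict.update]
    · simp only [List.foldl_cons, pvStepA, if_neg h]
      rw [ih]
      simp only [pvBodyLen, pvSections]
      rw [if_neg h, if_neg h]

-- A's loop with no pending topic equals inserting all sections
theorem pvLoop_none (lines : List String) :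
    ∀ (c : Int) (d : PySem.Dict String Int),
      (match (lines.foldl pvStepA (none, c, d)).1 with
       | some u => (lines.foldl pvStepA (none, c, d)).2.2.insert u (lines.foldl pvStepA (none, c, d)).2.1
       | none => (lines.foldl pvStepA (none, c, d)).2.2)
      = d.update (pvSections lines) := by
  induction lines with
  | nil => intro c d; simp [pvSections, PySem.Dict.update]
  | cons l r ih =>
    intro c d
    by_cases h : 0 < PySem.Str.count l "="
    · simp only [List.foldl_cons, pvStepA, if_pos h]
      rw [pvLoop_some]
      simp only [pvSections]
      rw [if_pos h]
    · simp only [List.foldl_cons, pvStepA, if_neg h]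
      rw [ih]
      simp only [pvSections]
      rw [if_neg h]

-- ===== VERDICT (by name: the statement is the Claim_ definition above) =====
theorem count_chars_in_topics_spec : Claim_equal_count_chars_in_topics := by
  intro s _hDom
  unfold Spec_count_chars_in_topics count_chars_in_topics count_chars_in_topics_alt
  exact congrArg PySem.Dict.items (pvLoop_none ((PySem.Str.split? s "\n").getD []) 0 PySem.Dict.empty)
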